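-- pv_equiv track=rewrite | github.com/cwaldbieser/aoc | 2022/day12/day12.py | create_connections
-- ===== SOURCE A (Python) =====
-- def coords_to_id(x, y, col_count):
--     return y * col_count + x
--
-- def create_connections(terrain):
--     """
--     Create a connections matrix from the terrain grid.
--     """
--     moves = [
--         (0, -1),
--         (0, 1),
--         (-1, 0),
--         (1, 0),
--     ]
--     row0 = terrain[0]
--     col_count = len(row0)
--     row_count = len(terrain)
--     terrain_count = col_count * row_count
--     connections = [[0] * terrain_count for _ in range(terrain_count)]
--     for j, row in enumerate(terrain):
--         for i, height in enumerate(row):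
--             for movenum, move in enumerate(moves):
--                 i1 = i + move[0]
--                 j1 = j + move[1]
--                 if i1 < 0 or j1 < 0:
--                     continue
--                 if i1 >= col_count or j1 >= row_count:
--                     continue
--                 next_height = terrain[j1][i1]
--                 if next_height - height > 1:
--                     continue
--                 terrain_id = coords_to_id(i, j, col_count)
--                 next_terrain_id = coords_to_id(i1, j1, col_count)
--                 connections[terrain_id][next_terrain_id] = 1
--     return connections
-- ===== SOURCE B (Python) =====
-- def create_connections(terrain):
--     """
--     Create a connections matrix from the terrain grid.
--     """
--     col_count = len(terrain[0])
--     row_count = len(terrain)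
--     n = col_count * row_count
--
--     def connected(u, v):
--         yu, xu = divmod(u, col_count)
--         yv, xv = divmod(v, col_count)
--         if abs(xu - xv) + abs(yu - yv) != 1:
--             return False
--         return terrain[yv][xv] - terrain[yu][xu] <= 1
--
--     return [[1 if connected(u, v) else 0 for v in range(n)] for u in range(n)]
-- ===== Notes on version B (the rewrite author's own statement) =====
-- stated objective: alternative
-- what changed: B tabulates each matrix entry directly with an id-decoding neighbour predicate (divmod + Manhattan-distance test over range(n)) instead of allocating an n-by-n zero matrix and mutating entries while scanning the grid with a 4-move offset list and bounds-check continues.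
-- intended difference: On grids whose non-last row j extends past the row-0 rectangle with a climbable step onto the first extra cell, A writes a spurious 1 at the accidentally colliding id pair ((j+1)*cols, j*cols+cols-1) (except when cols=1 and that entry is a genuinely climbable vertical step, where they coincide); B ignores cells outside the row-0 rectangle and leaves the entry 0, which is the intended reading of the grid. — e.g. on create_connections([[0], [9, 8], [0]]): A returns [[0, 0, 0], [1, 0, 1], [0, 1, 0]], B returns [[0, 0, 0], [1, 0, 1], [0, 0, 0]]
import Mathlib
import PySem

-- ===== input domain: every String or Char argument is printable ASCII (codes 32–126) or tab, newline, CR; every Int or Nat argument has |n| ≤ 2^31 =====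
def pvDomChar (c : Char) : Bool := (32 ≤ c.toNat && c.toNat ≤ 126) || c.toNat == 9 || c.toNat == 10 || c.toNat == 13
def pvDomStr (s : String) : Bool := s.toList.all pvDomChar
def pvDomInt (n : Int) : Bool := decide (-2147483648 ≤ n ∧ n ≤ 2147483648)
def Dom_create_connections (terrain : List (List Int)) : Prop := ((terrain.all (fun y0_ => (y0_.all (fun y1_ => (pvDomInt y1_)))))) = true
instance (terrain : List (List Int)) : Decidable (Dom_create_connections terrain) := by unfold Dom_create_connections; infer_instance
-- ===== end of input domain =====

-- B replaces A's zero-matrix-then-mutate grid scan (4-move offset list with bounds-check continues)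
-- by directly tabulating every matrix entry from an id-decoding neighbour predicate (divmod + Manhattan
-- test); on grids with a climbable over-long interior row A writes a spurious edge at a collided id
-- (stated as the intended difference D_ below), elsewhere the two agree.

-- ===== PORT A =====
def coords_to_id (x y col_count : Int) : Int := y * col_count + x

-- connections[u][v] = 1; exact for indices that are in range (guaranteed under Pre_)
def pvSetCell (m : List (List Int)) (u v : Int) : List (List Int) :=
  m.modify u.toNat (fun row => row.set v.toNat 1)

def create_connections (terrain : List (List Int)) : List (List Int) :=
  let moves : List (Int × Int) := [(0, -1), (0, 1), (-1, 0), (1, 0)]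
  let row0 := PySem.List.pyGetD terrain 0 []   -- terrain[0]; in range under Pre_ (terrain ≠ [])
  let col_count : Int := row0.length
  let row_count : Int := terrain.length
  let terrain_count := col_count * row_count
  let init := List.replicate terrain_count.toNat (List.replicate terrain_count.toNat (0 : Int))
  (PySem.List.enumerate terrain).foldl (fun conn jrow =>
    (PySem.List.enumerate jrow.2).foldl (fun conn ih =>
      moves.foldl (fun conn move =>
        let i1 := ih.1 + move.1
        let j1 := jrow.1 + move.2
        if i1 < 0 ∨ j1 < 0 then conn
        else if col_count ≤ i1 ∨ row_count ≤ j1 then conn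
        else
          -- terrain[j1][i1]; both indexings are in range under Pre_ (rectangular grid)
          let next_height := PySem.List.pyGetD (PySem.List.pyGetD terrain j1 []) i1 0
          if 1 < next_height - ih.2 then conn
          else pvSetCell conn (coords_to_id ih.1 jrow.1 col_count) (coords_to_id i1 j1 col_count))
        conn)
      conn)
    init

-- ===== PORT B =====
-- connected(u, v) of Source B; divmod and indexing are exact whenever this is evaluated under Pre_
-- (the loops are non-empty only when 0 < col_count, and decoded coordinates lie inside the grid)
def pvConnected (terrain : List (List Int)) (col_count u v : Int) : Bool :=
  let yu := PySem.Int.floordiv u col_count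
  let xu := PySem.Int.mod u col_count
  let yv := PySem.Int.floordiv v col_count
  let xv := PySem.Int.mod v col_count
  if (xu - xv).natAbs + (yu - yv).natAbs ≠ 1 then false
  else decide (PySem.List.pyGetD (PySem.List.pyGetD terrain yv []) xv 0
             - PySem.List.pyGetD (PySem.List.pyGetD terrain yu []) xu 0 ≤ 1)

def create_connections_alt (terrain : List (List Int)) : List (List Int) :=
  let col_count : Int := (PySem.List.pyGetD terrain 0 []).length   -- terrain[0]; in range under Pre_
  let row_count : Int := terrain.length
  let n := col_count * row_count
  (PySem.List.pyRange 0 n 1).map (fun u =>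
    (PySem.List.pyRange 0 n 1).map (fun v =>
      if pvConnected terrain col_count u v then 1 else 0))

-- ===== PRECONDITION & SPEC =====
-- grid dimensions and cell heights (read with defaults; used by Pre_/D_ below and the proofs)
def pvCol (t : List (List Int)) : Nat := (t.headD []).length
def pvHt (t : List (List Int)) (y x : Nat) : Int := (t.getD y []).getD x 0
-- row j extends past the row-0 rectangle and the step onto its first extra cell is climbable:
-- then A's scan of that extra cell performs a write (out of range if j is the last row)
abbrev pvFire (t : List (List Int)) (j : Nat) : Prop :=
  1 ≤ pvCol t ∧ pvCol t < (t.getD j []).length ∧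
    pvHt t j (pvCol t - 1) - pvHt t j (pvCol t) ≤ 1
-- Pre_ excludes exactly the inputs on which A raises IndexError: the empty grid (terrain[0]),
-- grids with a row shorter than row 0 (a neighbouring cell's height read goes out of range),
-- and grids whose LAST row fires (the spurious write's row id rows*cols is out of range).
def Pre_create_connections (terrain : List (List Int)) : Prop :=
  terrain ≠ [] ∧ (∀ row ∈ terrain, pvCol terrain ≤ row.length) ∧
    ¬ pvFire terrain (terrain.length - 1)
instance (terrain : List (List Int)) : Decidable (Pre_create_connections terrain) := by
  unfold Pre_create_connections; infer_instance

def pvWitness_create_connections : List (List Int) := [[0, 1], [2, 0]]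

-- On grids where a non-last row j fires, A follows its move scan into the out-of-rectangle cell
-- (cols, j) and writes a 1 at the accidentally colliding id pair ((j+1)*cols, j*cols+cols-1) — an
-- edge between two unrelated cells (unless cols = 1 and that entry is a genuinely climbable vertical
-- step, where the matrices coincide); B ignores cells outside the row-0 rectangle, which is the
-- intended reading of the grid, and leaves that entry 0.
def D_create_connections (terrain : List (List Int)) : Prop :=
  ∃ j < terrain.length - 1,
    let c := (terrain.headD []).length
    let r := terrain.getD j []
    0 < c ∧ c < r.length ∧ r.getD (c - 1) 0 - r.getD c 0 ≤ 1 ∧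
      ¬(c = 1 ∧ r.getD 0 0 - (terrain.getD (j + 1) []).getD 0 0 ≤ 1)
instance (terrain : List (List Int)) : Decidable (D_create_connections terrain) := by
  unfold D_create_connections; infer_instance

def Spec_create_connections (terrain : List (List Int)) (out : List (List Int)) : Prop := ¬ D_create_connections terrain → out = create_connections_alt terrain
instance (terrain : List (List Int)) (out : List (List Int)) : Decidable (Spec_create_connections terrain out) := by unfold Spec_create_connections; infer_instance

def pvDiffWitness_create_connections : List (List Int) := [[0], [9, 8], [0]]
def pvDiffWitnessOut_create_connections : (List (List Int)) × (List (List Int)) :=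
  ([[0, 0, 0], [1, 0, 1], [0, 1, 0]], [[0, 0, 0], [1, 0, 1], [0, 0, 0]])

-- ===== CLAIM (what is proved, stated in full; the proofs are below) =====
def Claim_unchanged_create_connections : Prop := ∀ (terrain : List (List Int)), Dom_create_connections terrain → Pre_create_connections terrain → Spec_create_connections terrain (create_connections terrain)
def Claim_changed_create_connections : Prop := Dom_create_connections (pvDiffWitness_create_connections) ∧ Pre_create_connections (pvDiffWitness_create_connections) ∧ D_create_connections (pvDiffWitness_create_connections) ∧ create_connections (pvDiffWitness_create_connections) = pvDiffWitnessOut_create_connections.1 ∧ create_connections_alt (pvDiffWitness_create_connections) = pvDiffWitnessOut_create_connections.2 ∧ pvDiffWitnessOut_create_connections.1 ≠ pvDiffWitnessOut_create_connections.2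
def Claim_exact_create_connections : Prop := ∀ (terrain : List (List Int)), Dom_create_connections terrain → Pre_create_connections terrain → D_create_connections terrain → create_connections terrain ≠ create_connections_alt terrain

-- ===== LEMMAS AND PROOFS =====
-- the vertical edge (0,j) → (0,j+1) is climbable (a width-1 grid coincidence for A's spurious write)
abbrev pvVedge (t : List (List Int)) (j : Nat) : Prop := pvHt t j 0 - pvHt t (j+1) 0 ≤ 1

def pvEntry (m : List (List Int)) (u v : Nat) : Int := (m.getD u []).getD v 0
def pvShape (m : List (List Int)) (N : Nat) : Prop :=
  m.length = N ∧ ∀ u : Nat, ((m[u]?).getD []).length = if u < N then N else 0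

lemma getD_eq (m : List (List Int)) (u : Nat) : m.getD u [] = (m[u]?).getD [] := by
  simp [List.getD_eq_getElem?_getD]

lemma shape_setCell (m : List (List Int)) (N : Nat) (p q : Int) (h : pvShape m N) :
    pvShape (pvSetCell m p q) N := by
  obtain ⟨h1, h2⟩ := h
  refine ⟨by simp [pvSetCell, h1], ?_⟩
  intro u
  unfold pvSetCell
  rw [List.getElem?_modify]
  by_cases hpu : p.toNat = u
  · subst hpu
    have := h2 p.toNat
    cases hc : m[p.toNat]? with
    | none => simp [hc] at this ⊢; omega
    | some r => simp [hc] at this ⊢; omega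
  · simp [hpu, h2 u]

lemma entry_setCell (m : List (List Int)) (N : Nat) (p q : Int) (hsh : pvShape m N)
    (hpN : p.toNat < N) (hqN : q.toNat < N) (u v : Nat) :
    pvEntry (pvSetCell m p q) u v = if p.toNat = u ∧ q.toNat = v then 1 else pvEntry m u v := by
  obtain ⟨h1, h2⟩ := hsh
  unfold pvEntry pvSetCell
  rw [getD_eq, getD_eq m, List.getElem?_modify]
  by_cases hpu : p.toNat = u
  · subst hpu
    have hlt : p.toNat < m.length := by omega
    rw [List.getElem?_eq_getElem hlt]
    have hrow : (m[p.toNat]).length = N := by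
      have := h2 p.toNat
      rw [List.getElem?_eq_getElem hlt] at this
      simpa [hpN] using this
    simp only [eq_self_iff_true, if_true, true_and, Option.map_eq_map, Option.map_some,
      Option.getD_some]
    rw [List.getD_eq_getElem?_getD, List.getD_eq_getElem?_getD, List.getElem?_set]
    by_cases hqv : q.toNat = v
    · subst hqv
      simp [show q.toNat < (m[p.toNat]).length by omega]
    · simp [hqv]
  · simp [hpu]

lemma shape_foldl {α : Type} (l : List α) (c : α → Bool) (p q : α → Int) (N : Nat) :
    ∀ m, pvShape m N →
      pvShape (l.foldl (fun m a => if c a then pvSetCell m (p a) (q a) else m) m) N := by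
  induction l with
  | nil => intro m hm; simpa using hm
  | cons a l ih =>
    intro m hm
    simp only [List.foldl_cons]
    apply ih
    by_cases hc : c a <;> simp [hc, shape_setCell _ _ _ _ hm, hm]

lemma entry_foldl {α : Type} (l : List α) (c : α → Bool) (p q : α → Int) (N : Nat)
    (hl : ∀ a ∈ l, c a = true → (p a).toNat < N ∧ (q a).toNat < N) :
    ∀ m, pvShape m N → ∀ u v : Nat,
      pvEntry (l.foldl (fun m a => if c a then pvSetCell m (p a) (q a) else m) m) u v
        = if (∃ a ∈ l, c a = true ∧ (p a).toNat = u ∧ (q a).toNat = v) then 1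
          else pvEntry m u v := by
  induction l with
  | nil => intro m hm u v; simp
  | cons a l ih =>
    intro m hm u v
    simp only [List.foldl_cons]
    have hstep : pvShape (if c a then pvSetCell m (p a) (q a) else m) N := by
      by_cases hc : c a <;> simp [hc, shape_setCell _ _ _ _ hm, hm]
    rw [ih (fun b hb => hl b (List.mem_cons_of_mem _ hb)) _ hstep]
    by_cases hex : ∃ b ∈ l, c b = true ∧ (p b).toNat = u ∧ (q b).toNat = v
    · rw [if_pos hex, if_pos]
      obtain ⟨b, hb, h⟩ := hex
      exact ⟨b, List.mem_cons_of_mem _ hb, h⟩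
    · rw [if_neg hex]
      by_cases hc : c a
      · obtain ⟨hpN, hqN⟩ := hl a List.mem_cons_self hc
        rw [if_pos hc, entry_setCell m N _ _ hm hpN hqN]
        by_cases hm1 : (p a).toNat = u ∧ (q a).toNat = v
        · rw [if_pos hm1, if_pos ⟨a, List.mem_cons_self, hc, hm1⟩]
        · rw [if_neg hm1, if_neg]
          rintro ⟨b, hb, hbc⟩
          rcases List.mem_cons.mp hb with rfl | hb'
          · exact hm1 ⟨hbc.2.1, hbc.2.2⟩
          · exact hex ⟨b, hb', hbc⟩
      · rw [if_neg hc, if_neg]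
        rintro ⟨b, hb, hbc⟩
        rcases List.mem_cons.mp hb with rfl | hb'
        · exact hc hbc.1
        · exact hex ⟨b, hb', hbc⟩

def pvMoves : List (Int × Int) := [(0, -1), (0, 1), (-1, 0), (1, 0)]
def pvOps (t : List (List Int)) : List ((Int × List Int) × (Int × Int) × (Int × Int)) :=
  (PySem.List.enumerate t).flatMap (fun jr =>
    (PySem.List.enumerate jr.2).flatMap (fun ih =>
      pvMoves.map (fun mv => (jr, ih, mv))))
def pvCond (t : List (List Int)) (col rows : Int)
    (a : (Int × List Int) × (Int × Int) × (Int × Int)) : Bool :=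
  decide (¬(a.2.1.1 + a.2.2.1 < 0 ∨ a.1.1 + a.2.2.2 < 0) ∧
          ¬(col ≤ a.2.1.1 + a.2.2.1 ∨ rows ≤ a.1.1 + a.2.2.2) ∧
          ¬(1 < PySem.List.pyGetD (PySem.List.pyGetD t (a.1.1 + a.2.2.2) []) (a.2.1.1 + a.2.2.1) 0
              - a.2.1.2))
def pvP (col : Int) (a : (Int × List Int) × (Int × Int) × (Int × Int)) : Int :=
  coords_to_id a.2.1.1 a.1.1 col
def pvQ (col : Int) (a : (Int × List Int) × (Int × Int) × (Int × Int)) : Int :=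
  coords_to_id (a.2.1.1 + a.2.2.1) (a.1.1 + a.2.2.2) col
def pvN (t : List (List Int)) : Nat := pvCol t * t.length
lemma pyGetD_zero_headD (t : List (List Int)) : PySem.List.pyGetD t 0 [] = t.headD [] := by
  cases t <;> simp [PySem.List.pyGetD, PySem.List.pyGet?, PySem.List.pyIdx?]

lemma a_opsfold (t : List (List Int)) :
    create_connections t =
      (pvOps t).foldl
        (fun m a => if pvCond t (pvCol t) t.length a then
            pvSetCell m (pvP (pvCol t) a) (pvQ (pvCol t) a) else m)
        (List.replicate (pvN t) (List.replicate (pvN t) (0 : Int))) := by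
  unfold create_connections pvOps
  rw [List.foldl_flatMap]
  simp only [pyGetD_zero_headD]
  have hN : (((pvCol t : Int) * (t.length : Int))).toNat = pvN t := by
    simp [pvN, pvCol]; push_cast; omega
  rw [show ((t.headD []).length : Int) = (pvCol t : Int) from by simp [pvCol]]
  rw [hN]
  apply PySem.List.foldl_congr_mem
  intro acc jr _
  rw [List.foldl_flatMap]
  apply PySem.List.foldl_congr_mem
  intro acc2 ih _
  rw [List.foldl_map]
  apply PySem.List.foldl_congr_mem
  intro acc3 mv _
  simp only [pvCond, pvP, pvQ]
  by_cases h1 : ih.1 + mv.1 < 0 ∨ jr.1 + mv.2 < 0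
  · simp [h1]
  · by_cases h2 : (pvCol t : Int) ≤ ih.1 + mv.1 ∨ (t.length : Int) ≤ jr.1 + mv.2
    · simp [h1, h2]
    · by_cases h3 : 1 < PySem.List.pyGetD (PySem.List.pyGetD t (jr.1 + mv.2) []) (ih.1 + mv.1) 0 - ih.2
      · simp [h1, h2, h3]
      · simp [h1, h2, h3]
abbrev pvConn (t : List (List Int)) (u v : Nat) : Prop :=
  ((u % pvCol t : Int) - (v % pvCol t)).natAbs + ((u / pvCol t : Int) - (v / pvCol t)).natAbs = 1 ∧
  pvHt t (v / pvCol t) (v % pvCol t) - pvHt t (u / pvCol t) (u % pvCol t) ≤ 1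

lemma dec_mod (c k i : Nat) (hi : i < c) : (k * c + i) % c = i := by
  rw [Nat.add_comm, Nat.add_mul_mod_self_right]; exact Nat.mod_eq_of_lt hi

lemma dec_div (c k i : Nat) (hi : i < c) : (k * c + i) / c = k := by
  rw [Nat.add_comm, Nat.add_mul_div_right _ _ (by omega : 0 < c), Nat.div_eq_of_lt hi]
  omega

lemma id_bound (c R k i : Nat) (hk : k < R) (hi : i < c) : k * c + i < c * R := by nlinarith

lemma id_toNat (c k i : Nat) : ((k : Int) * (c : Int) + (i : Int)).toNat = k * c + i := by
  have : ((k : Int) * (c : Int) + (i : Int)) = ((k * c + i : Nat) : Int) := by push_cast; ring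
  rw [this, Int.toNat_natCast]

lemma ht_pyGetD (t : List (List Int)) (y x : Nat) :
    PySem.List.pyGetD (PySem.List.pyGetD t (y : Int) []) (x : Int) 0 = pvHt t y x := by
  simp [pvHt, PySem.List.pyGetD_natCast]

lemma getElem_ht (t : List (List Int)) (k : Nat) (hk : k < t.length) (i : Nat) :
    (t[k]).getD i 0 = pvHt t k i := by
  simp [pvHt, List.getD_eq_getElem?_getD, List.getElem?_eq_getElem hk]

lemma conn_decoded (t : List (List Int)) (k i k' i' : Nat)
    (hic : i < pvCol t) (hi'c : i' < pvCol t) :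
    pvConn t (k * pvCol t + i) (k' * pvCol t + i') ↔
      (((i : Int) - (i' : Int)).natAbs + ((k : Int) - (k' : Int)).natAbs = 1 ∧
        pvHt t k' i' - pvHt t k i ≤ 1) := by
  unfold pvConn
  rw [← Int.natCast_mod, ← Int.natCast_mod, ← Int.natCast_div, ← Int.natCast_div,
    dec_mod _ _ _ hic, dec_div _ _ _ hic, dec_mod _ _ _ hi'c, dec_div _ _ _ hi'c]

-- what a condition-passing scan step at an out-of-rectangle cell must look like
lemma extra_cell (t : List (List Int)) (k i : Nat) (dx dy : Int)
    (hk : k < t.length) (hi : i < (t[k]).length) (hnic : ¬ i < pvCol t)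
    (hdxy : (dx = 0 ∧ (dy = 1 ∨ dy = -1)) ∨ (dy = 0 ∧ (dx = 1 ∨ dx = -1)))
    (hb1 : 0 ≤ (i : Int) + dx ∧ 0 ≤ (k : Int) + dy)
    (hb2 : (i : Int) + dx < (pvCol t : Int) ∧ (k : Int) + dy < (t.length : Int))
    (hb3 : ¬ 1 < PySem.List.pyGetD (PySem.List.pyGetD t ((k : Int) + dy) []) ((i : Int) + dx) 0
        - (t[k])[i])
    (hlast : ¬ pvFire t (t.length - 1)) :
    dx = -1 ∧ dy = 0 ∧ i = pvCol t ∧ pvFire t k ∧ k + 1 < t.length := by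
  have hdx : dx = -1 ∧ dy = 0 := by omega
  have hieq : i = pvCol t := by omega
  obtain ⟨hdx1, hdy0⟩ := hdx
  subst hdx1; subst hdy0
  have hgetd : t.getD k [] = t[k] := by
    rw [List.getD_eq_getElem?_getD, List.getElem?_eq_getElem hk, Option.getD_some]
  have hfire : pvFire t k := by
    refine ⟨by omega, by rw [hgetd]; omega, ?_⟩
    have e1 : ((k : Int)) + 0 = ((k : Nat) : Int) := by ring
    have e2 : ((i : Int)) + -1 = (((pvCol t - 1 : Nat)) : Int) := by
      have : 1 ≤ pvCol t := by omega
      push_cast; omega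
    rw [e1, e2, ht_pyGetD] at hb3
    have h2 : (t[k])[i] = pvHt t k (pvCol t) := by
      rw [pvHt, hgetd, List.getD_eq_getElem?_getD, List.getElem?_eq_getElem (by omega : pvCol t < (t[k]).length)]
      simp [hieq]
    rw [h2] at hb3
    omega
  refine ⟨rfl, rfl, hieq, hfire, ?_⟩
  by_contra hle
  have hkeq : k = t.length - 1 := by omega
  rw [hkeq] at hfire
  exact hlast hfire

lemma exists_iff_conn (t : List (List Int))
    (hwide : ∀ row ∈ t, pvCol t ≤ row.length)
    (hlast : ¬ pvFire t (t.length - 1))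
    (hcoin : ∀ j, j + 1 < t.length → pvFire t j → (pvCol t = 1 ∧ pvVedge t j))
    (u v : Nat) (hu : u < pvN t) (hv : v < pvN t) :
    (∃ a ∈ pvOps t, pvCond t (pvCol t) t.length a = true ∧
        (pvP (pvCol t) a).toNat = u ∧ (pvQ (pvCol t) a).toNat = v) ↔ pvConn t u v := by
  have hc0 : 0 < pvCol t := by
    by_contra h
    have : pvCol t = 0 := by omega
    simp [pvN, this] at hu
  constructor
  · rintro ⟨a, hmem, hcond, hpu, hqv⟩
    simp only [pvOps, List.mem_flatMap, List.mem_map, PySem.List.mem_enumerate_iff] at hmem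
    obtain ⟨jr, ⟨k, hk, rfl⟩, ih, ⟨i, hi, rfl⟩, ⟨dx, dy⟩, hmv, rfl⟩ := hmem
    simp only [pvCond, decide_eq_true_eq, zero_add] at hcond
    obtain ⟨hb1, hb2, hb3⟩ := hcond
    push_neg at hb1 hb2
    simp only [pvP, pvQ, coords_to_id, zero_add] at hpu hqv
    have hdxy : (dx = 0 ∧ (dy = 1 ∨ dy = -1)) ∨ (dy = 0 ∧ (dx = 1 ∨ dx = -1)) := by
      simp only [pvMoves, List.mem_cons, List.not_mem_nil, or_false, Prod.mk.injEq] at hmv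
      tauto
    by_cases hic : i < pvCol t
    swap
    · -- scan step at an out-of-rectangle cell: A's spurious write; ¬D_ forces the coincidence case
      obtain ⟨hdx1, hdy0, hieq, hfire, hk1⟩ :=
        extra_cell t k i dx dy hk hi hic hdxy hb1 hb2 hb3 hlast
      obtain ⟨hc1, hved⟩ := hcoin k hk1 hfire
      subst hdx1; subst hdy0
      rw [id_toNat] at hpu
      have e2 : ((k : Int)) + 0 = ((k : Nat) : Int) := by ring
      have e1 : ((i : Int)) + -1 = (((i - 1 : Nat)) : Int) := by push_cast; omega
      rw [e2, e1, id_toNat] at hqv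
      have huv : u = k + 1 ∧ v = k := by
        constructor <;> [rw [← hpu]; rw [← hqv]] <;> rw [hc1] <;> omega
      obtain ⟨hu1, hv1⟩ := huv
      subst hu1; subst hv1
      refine ⟨?_, ?_⟩
      · simp only [hc1, Nat.mod_one, Nat.div_one]
        omega
      · simp only [hc1, Nat.mod_one, Nat.div_one]
        exact hved
    · set k' := ((k : Int) + dy).toNat with hk'
      set i' := ((i : Int) + dx).toNat with hi'
      have hik' : ((k' : Int)) = (k : Int) + dy := Int.toNat_of_nonneg hb1.2
      have hii' : ((i' : Int)) = (i : Int) + dx := Int.toNat_of_nonneg hb1.1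
      have hk'R : k' < t.length := by omega
      have hi'c : i' < pvCol t := by omega
      have hueq : u = k * pvCol t + i := by rw [← hpu, id_toNat]
      have hveq : v = k' * pvCol t + i' := by
        rw [← hqv, ← hii', ← hik', id_toNat]
      rw [hueq, hveq, conn_decoded t k i k' i' hic hi'c]
      refine ⟨by omega, ?_⟩
      have h1 : PySem.List.pyGetD (PySem.List.pyGetD t ((k : Int) + dy) []) ((i : Int) + dx) 0
          = pvHt t k' i' := by rw [← hik', ← hii', ht_pyGetD]
      rw [h1] at hb3
      have h2 : (t[k])[i] = pvHt t k i := by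
        rw [← getElem_ht t k hk i, List.getD_eq_getElem?_getD, List.getElem?_eq_getElem hi,
          Option.getD_some]
      omega
  · rintro ⟨hadj, hht⟩
    have hiu : u % pvCol t < pvCol t := Nat.mod_lt _ hc0
    have hiv : v % pvCol t < pvCol t := Nat.mod_lt _ hc0
    have hku : u / pvCol t < t.length := by
      rw [Nat.div_lt_iff_lt_mul hc0]
      have := hu; rw [pvN, Nat.mul_comm] at this; exact this
    have hkv : v / pvCol t < t.length := by
      rw [Nat.div_lt_iff_lt_mul hc0]
      have := hv; rw [pvN, Nat.mul_comm] at this; exact this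
    have hueq : (u / pvCol t) * pvCol t + u % pvCol t = u := by
      rw [Nat.mul_comm]; exact Nat.div_add_mod u _
    have hveq : (v / pvCol t) * pvCol t + v % pvCol t = v := by
      rw [Nat.mul_comm]; exact Nat.div_add_mod v _
    obtain ⟨hA, hH⟩ := (conn_decoded t (u / pvCol t) (u % pvCol t) (v / pvCol t) (v % pvCol t)
      hiu hiv).mp (by rw [hueq, hveq]; exact ⟨hadj, hht⟩)
    have hrow : pvCol t ≤ (t[u / pvCol t]).length := hwide _ (List.getElem_mem hku)
    have hiu' : u % pvCol t < (t[u / pvCol t]).length := by omega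
    refine ⟨(((((u / pvCol t : Nat) : Int)), t[u / pvCol t]),
        ((((((u % pvCol t : Nat) : Int)), (t[u / pvCol t])[u % pvCol t]),
         ((((v % pvCol t : Nat) : Int) - ((u % pvCol t : Nat) : Int)),
          (((v / pvCol t : Nat) : Int) - ((u / pvCol t : Nat) : Int)))))), ?_, ?_, ?_, ?_⟩
    · refine List.mem_flatMap.mpr ⟨(((u / pvCol t : Nat) : Int), t[u / pvCol t]), ?_, ?_⟩
      · exact Iff.mpr (PySem.List.mem_enumerate_iff _ _ _) ⟨u / pvCol t, hku, by simp⟩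
      · refine List.mem_flatMap.mpr ⟨(((u % pvCol t : Nat) : Int), (t[u / pvCol t])[u % pvCol t]),
          ?_, ?_⟩
        · exact Iff.mpr (PySem.List.mem_enumerate_iff _ _ _) ⟨u % pvCol t, hiu', by simp⟩
        · refine List.mem_map.mpr ⟨_, ?_, rfl⟩
          simp only [pvMoves, List.mem_cons, List.not_mem_nil, or_false, Prod.mk.injEq]
          omega
    · simp only [pvCond, decide_eq_true_eq]
      have e1 : ((u % pvCol t : Nat) : Int) + (((v % pvCol t : Nat) : Int) - ((u % pvCol t : Nat) : Int))
          = ((v % pvCol t : Nat) : Int) := by ring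
      have e2 : ((u / pvCol t : Nat) : Int) + (((v / pvCol t : Nat) : Int) - ((u / pvCol t : Nat) : Int))
          = ((v / pvCol t : Nat) : Int) := by ring
      rw [e1, e2, ht_pyGetD]
      have h2 : (t[u / pvCol t])[u % pvCol t] = pvHt t (u / pvCol t) (u % pvCol t) := by
        rw [← getElem_ht t (u / pvCol t) hku (u % pvCol t), List.getD_eq_getElem?_getD,
          List.getElem?_eq_getElem hiu', Option.getD_some]
      rw [h2]
      have n1 : (0:Int) ≤ ((v / pvCol t : Nat) : Int) := Int.natCast_nonneg _
      have n2 : (0:Int) ≤ ((v % pvCol t : Nat) : Int) := Int.natCast_nonneg _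
      have n3 : ((v % pvCol t : Nat) : Int) < ((pvCol t : Nat) : Int) := Int.ofNat_lt.mpr hiv
      have n4 : ((v / pvCol t : Nat) : Int) < ((t.length : Nat) : Int) := Int.ofNat_lt.mpr hkv
      refine ⟨by omega, by omega, by omega⟩
    · simp only [pvP, coords_to_id]
      rw [id_toNat]; omega
    · simp only [pvQ, coords_to_id]
      have e1 : ((u % pvCol t : Nat) : Int) + (((v % pvCol t : Nat) : Int) - ((u % pvCol t : Nat) : Int))
          = ((v % pvCol t : Nat) : Int) := by ring
      have e2 : ((u / pvCol t : Nat) : Int) + (((v / pvCol t : Nat) : Int) - ((u / pvCol t : Nat) : Int))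
          = ((v / pvCol t : Nat) : Int) := by ring
      rw [e1, e2, id_toNat]; omega

def pvTab (t : List (List Int)) : List (List Int) :=
  (List.range (pvN t)).map (fun u => (List.range (pvN t)).map (fun v => if pvConn t u v then 1 else 0))

lemma shape_init (N : Nat) : pvShape (List.replicate N (List.replicate N (0 : Int))) N := by
  refine ⟨by simp, fun u => ?_⟩
  rw [List.getElem?_replicate]
  split <;> simp

lemma entry_init (N u v : Nat) : pvEntry (List.replicate N (List.replicate N (0 : Int))) u v = 0 := by
  unfold pvEntry
  rw [getD_eq, List.getElem?_replicate]
  split <;> simp [List.getD_eq_getElem?_getD, List.getElem?_replicate] <;> split <;> simp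

lemma ops_range (t : List (List Int)) (hlast : ¬ pvFire t (t.length - 1)) :
    ∀ a ∈ pvOps t, pvCond t (pvCol t) t.length a = true →
      (pvP (pvCol t) a).toNat < pvN t ∧ (pvQ (pvCol t) a).toNat < pvN t := by
  intro a hmem hcond
  simp only [pvOps, List.mem_flatMap, List.mem_map, PySem.List.mem_enumerate_iff] at hmem
  obtain ⟨jr, ⟨k, hk, rfl⟩, ih, ⟨i, hi, rfl⟩, ⟨dx, dy⟩, hmv, rfl⟩ := hmem
  simp only [pvCond, decide_eq_true_eq, zero_add] at hcond
  obtain ⟨hb1, hb2, hb3⟩ := hcond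
  push_neg at hb1 hb2
  have hdxy : (dx = 0 ∧ (dy = 1 ∨ dy = -1)) ∨ (dy = 0 ∧ (dx = 1 ∨ dx = -1)) := by
    simp only [pvMoves, List.mem_cons, List.not_mem_nil, or_false, Prod.mk.injEq] at hmv
    tauto
  simp only [pvP, pvQ, coords_to_id, zero_add]
  constructor
  · rw [id_toNat]
    by_cases hic : i < pvCol t
    · exact id_bound _ _ _ _ hk hic
    · obtain ⟨hdx1, hdy0, hieq, hfire, hk1⟩ :=
        extra_cell t k i dx dy hk hi hic hdxy hb1 hb2 hb3 hlast
      have h1 : 1 ≤ pvCol t := hfire.1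
      have h3 : pvCol t * (k + 2) ≤ pvCol t * t.length := Nat.mul_le_mul_left _ (by omega)
      rw [pvN]
      nlinarith [h3, h1, hieq]
  · set k' := ((k : Int) + dy).toNat with hk'
    set i' := ((i : Int) + dx).toNat with hi'
    have hik' : ((k' : Int)) = (k : Int) + dy := Int.toNat_of_nonneg hb1.2
    have hii' : ((i' : Int)) = (i : Int) + dx := Int.toNat_of_nonneg hb1.1
    rw [← hik', ← hii', id_toNat]
    exact id_bound _ _ _ _ (by omega) (by omega)

lemma a_char (t : List (List Int))
    (hwide : ∀ row ∈ t, pvCol t ≤ row.length)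
    (hlast : ¬ pvFire t (t.length - 1))
    (hcoin : ∀ j, j + 1 < t.length → pvFire t j → (pvCol t = 1 ∧ pvVedge t j)) :
    create_connections t = pvTab t := by
  rw [a_opsfold]
  have hshF := shape_foldl (pvOps t)
    (fun a => pvCond t (pvCol t) t.length a) (pvP (pvCol t)) (pvQ (pvCol t)) (pvN t)
    _ (shape_init (pvN t))
  apply List.ext_getElem
  · rw [hshF.1]; simp [pvTab]
  · intro u h1 h2
    have hu : u < pvN t := by rw [← hshF.1]; exact h1
    apply List.ext_getElem
    · have := hshF.2 u
      rw [List.getElem?_eq_getElem h1] at this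
      simp only [Option.getD_some, if_pos hu] at this
      rw [this]
      simp [pvTab, hu]
    · intro v hv1 hv2
      have hv : v < pvN t := by
        have := hshF.2 u
        rw [List.getElem?_eq_getElem h1] at this
        simp only [Option.getD_some, if_pos hu] at this
        omega
      have hentry : pvEntry (List.foldl
          (fun m a => if pvCond t (↑(pvCol t)) (↑t.length) a = true then
            pvSetCell m (pvP (↑(pvCol t)) a) (pvQ (↑(pvCol t)) a) else m)
          (List.replicate (pvN t) (List.replicate (pvN t) 0)) (pvOps t)) u v
          = if pvConn t u v then 1 else 0 := by
        rw [entry_foldl (pvOps t) _ _ _ (pvN t) (ops_range t hlast) _ (shape_init (pvN t)) u v,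
          entry_init]
        by_cases hc : pvConn t u v
        · rw [if_pos hc, if_pos]
          exact (exists_iff_conn t hwide hlast hcoin u v hu hv).mpr hc
        · rw [if_neg hc, if_neg]
          intro hex
          exact hc ((exists_iff_conn t hwide hlast hcoin u v hu hv).mp hex)
      have hget : pvEntry (List.foldl
          (fun m a => if pvCond t (↑(pvCol t)) (↑t.length) a = true then
            pvSetCell m (pvP (↑(pvCol t)) a) (pvQ (↑(pvCol t)) a) else m)
          (List.replicate (pvN t) (List.replicate (pvN t) 0)) (pvOps t)) u v
          = (List.foldl
          (fun m a => if pvCond t (↑(pvCol t)) (↑t.length) a = true then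
            pvSetCell m (pvP (↑(pvCol t)) a) (pvQ (↑(pvCol t)) a) else m)
          (List.replicate (pvN t) (List.replicate (pvN t) 0)) (pvOps t))[u][v]'hv1 := by
        unfold pvEntry
        rw [getD_eq, List.getElem?_eq_getElem h1, Option.getD_some,
          List.getD_eq_getElem?_getD, List.getElem?_eq_getElem hv1, Option.getD_some]
      rw [← hget, hentry]
      simp [pvTab, List.getElem_map, List.getElem_range, hu, hv]

lemma connected_eq (t : List (List Int)) (u v : Nat) :
    pvConnected t (pvCol t : Int) (u : Int) (v : Int) = decide (pvConn t u v) := by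
  simp only [pvConnected, pvConn, pvHt, PySem.Int.floordiv_natCast, PySem.Int.mod_natCast,
    PySem.List.pyGetD_natCast]
  by_cases h : ((u % pvCol t : Int) - (v % pvCol t)).natAbs + ((u / pvCol t : Int) - (v / pvCol t)).natAbs = 1
  · simp [h]
  · simp [h]

lemma b_char (t : List (List Int)) : create_connections_alt t = pvTab t := by
  unfold create_connections_alt pvTab
  simp only [pyGetD_zero_headD]
  have hcol : ((t.headD []).length : Int) = (pvCol t : Int) := by simp [pvCol]
  rw [hcol]
  have hn : (pvCol t : Int) * (t.length : Int) = ((pvN t : Nat) : Int) := by push_cast [pvN]; ring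
  rw [hn]
  have hr : PySem.List.pyRange 0 ((pvN t : Nat) : Int) 1 = List.map (fun k : Nat => (k : Int)) (List.range (pvN t)) := by
    rw [PySem.List.pyRange_one]
    simp only [Int.sub_zero, Int.toNat_natCast, zero_add]
  rw [hr, List.map_map]
  refine List.map_congr_left (fun u _ => ?_)
  simp only [Function.comp_apply, List.map_map]
  refine List.map_congr_left (fun v _ => ?_)
  simp only [Function.comp_apply, connected_eq]
  split <;> simp_all

-- ===== VERDICT (by name: the statement is the Claim_ definition above) =====
theorem create_connections_spec : Claim_unchanged_create_connections := by
  intro t _ hpre hnd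
  have hcoin : ∀ j, j + 1 < t.length → pvFire t j → (pvCol t = 1 ∧ pvVedge t j) := by
    intro j hj1 hf
    by_contra hnc
    exact hnd ⟨j, by omega, hf.1, hf.2.1, hf.2.2, hnc⟩
  rw [a_char t hpre.2.1 hpre.2.2 hcoin, b_char t]

theorem create_connections_changed : Claim_changed_create_connections := by
  unfold Claim_changed_create_connections; decide

lemma entry_tab (t : List (List Int)) (u v : Nat) (hu : u < pvN t) (hv : v < pvN t) :
    pvEntry (pvTab t) u v = if pvConn t u v then 1 else 0 := by
  unfold pvEntry pvTab
  simp [List.getD_eq_getElem?_getD, List.getElem?_map, List.getElem?_range, hu, hv]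

theorem create_connections_tight : Claim_exact_create_connections := by
  unfold Claim_exact_create_connections
  intro t _ hpre hd heq
  obtain ⟨j, hjlt, hrest⟩ := hd
  obtain ⟨hc0, hlen, hstep, hnco⟩ := hrest
  rw [show (t.headD []).length = pvCol t from rfl] at hc0 hlen hstep hnco
  have hc0' : 0 < pvCol t := hc0
  have hrows : j + 2 ≤ t.length := by omega
  have hgetd : t.getD j [] = t[j]'(by omega) := by
    rw [List.getD_eq_getElem?_getD, List.getElem?_eq_getElem (by omega : j < t.length),
      Option.getD_some]
  have hlen' : pvCol t < (t[j]'(by omega : j < t.length)).length := by rw [← hgetd]; exact hlen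
  have hu : j * pvCol t + pvCol t < pvN t := by
    have h := id_bound (pvCol t) t.length (j + 1) 0 (by omega) hc0'
    rw [Nat.succ_mul] at h
    simpa using h
  have hv : j * pvCol t + (pvCol t - 1) < pvN t :=
    id_bound _ _ j (pvCol t - 1) (by omega) (by omega)
  have hA : pvEntry (create_connections t) (j * pvCol t + pvCol t) (j * pvCol t + (pvCol t - 1))
      = 1 := by
    rw [a_opsfold, entry_foldl (pvOps t) _ _ _ (pvN t) (ops_range t hpre.2.2) _
      (shape_init (pvN t)), entry_init, if_pos]
    refine ⟨(((((j : Nat) : Int)), t[j]'(by omega)),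
        (((((pvCol t : Nat) : Int)), (t[j]'(by omega))[pvCol t]'hlen'),
         (((-1 : Int)), ((0 : Int))))), ?_, ?_, ?_, ?_⟩
    · refine List.mem_flatMap.mpr ⟨((((j : Nat) : Int)), t[j]'(by omega)), ?_, ?_⟩
      · exact Iff.mpr (PySem.List.mem_enumerate_iff _ _ _) ⟨j, by omega, by simp⟩
      · refine List.mem_flatMap.mpr ⟨(((pvCol t : Nat) : Int),
          (t[j]'(by omega))[pvCol t]'hlen'), ?_, ?_⟩
        · exact Iff.mpr (PySem.List.mem_enumerate_iff _ _ _) ⟨pvCol t, hlen', by simp⟩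
        · exact List.mem_map.mpr ⟨((-1 : Int), (0 : Int)), by simp [pvMoves], rfl⟩
    · simp only [pvCond, decide_eq_true_eq]
      refine ⟨by push_cast; omega, by push_cast; omega, ?_⟩
      have e2 : ((j : Nat) : Int) + 0 = ((j : Nat) : Int) := by ring
      have e1 : ((pvCol t : Nat) : Int) + -1 = (((pvCol t - 1 : Nat)) : Int) := by
        push_cast; omega
      rw [e1, e2, ht_pyGetD]
      have h2 : (t[j]'(by omega : j < t.length))[pvCol t]'hlen' = (t.getD j []).getD (pvCol t) 0 := by
        rw [hgetd, List.getD_eq_getElem?_getD, List.getElem?_eq_getElem hlen', Option.getD_some]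
      rw [h2]
      have h3 : pvHt t j (pvCol t - 1) = (t.getD j []).getD (pvCol t - 1) 0 := rfl
      rw [h3]
      omega
    · simp only [pvP, coords_to_id]
      rw [id_toNat]
    · simp only [pvQ, coords_to_id]
      have e2 : ((j : Nat) : Int) + 0 = ((j : Nat) : Int) := by ring
      have e1 : ((pvCol t : Nat) : Int) + -1 = (((pvCol t - 1 : Nat)) : Int) := by
        push_cast; omega
      rw [e1, e2, id_toNat]
  have hB : pvEntry (create_connections_alt t) (j * pvCol t + pvCol t)
      (j * pvCol t + (pvCol t - 1)) = 0 := by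
    rw [b_char, entry_tab t _ _ hu hv, if_neg]
    rw [show j * pvCol t + pvCol t = (j + 1) * pvCol t + 0 from by rw [Nat.succ_mul, Nat.add_zero],
      conn_decoded t (j + 1) 0 j (pvCol t - 1) hc0' (by omega)]
    rintro ⟨ha, hh⟩
    have hc1 : pvCol t = 1 := by omega
    refine hnco ⟨hc1, ?_⟩
    have h4 : pvHt t j (pvCol t - 1) = (t.getD j []).getD 0 0 := by simp [hc1, pvHt]
    have h5 : pvHt t (j + 1) 0 = (t.getD (j + 1) []).getD 0 0 := rfl
    rw [h4, h5] at hh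
    exact hh
  rw [heq] at hA
  rw [hA] at hB
  exact absurd hB (by decide)
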